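-- pv_equiv track=rewrite | github.com/TweestidBunny/python_journey | day8/main.py | true_number
-- ===== SOURCE A (Python) =====
-- def true_number(name):
--   word = 'true'
--   total = 0
--
--   for letter in name:
--     if letter.isalpha():
--       if letter.lower() in word:
--         total += 1
--   return total
-- ===== SOURCE B (Python) =====
-- def true_number(name):
--   # One pass building a per-letter frequency table, then a short pass over 'true'.
--   cnt = {}
--   for l in name:
--     if l.isalpha():
--       k = l.lower()
--       cnt[k] = cnt.get(k, 0) + 1
--   return sum(cnt.get(c, 0) for c in 'true')
-- ===== Notes on version B (the rewrite author's own statement) =====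
-- stated objective: alternative
-- what changed: B builds a frequency table of the lowercased alphabetic characters in one pass and then sums the counts of the four target letters of 'true', instead of testing substring membership in 'true' for every character.
import Mathlib
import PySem

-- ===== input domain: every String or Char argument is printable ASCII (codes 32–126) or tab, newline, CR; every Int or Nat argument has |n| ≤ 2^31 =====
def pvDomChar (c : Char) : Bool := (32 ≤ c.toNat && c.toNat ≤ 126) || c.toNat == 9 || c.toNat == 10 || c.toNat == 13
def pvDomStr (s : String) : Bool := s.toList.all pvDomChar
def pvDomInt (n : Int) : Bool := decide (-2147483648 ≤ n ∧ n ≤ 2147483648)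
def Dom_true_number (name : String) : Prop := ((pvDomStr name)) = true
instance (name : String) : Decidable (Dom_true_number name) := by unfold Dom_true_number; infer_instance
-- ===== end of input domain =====

-- B counts via a frequency table of lowercased alphabetic characters plus a second pass over 'true' (objective: alternative, same cost).

-- ===== PORT A =====
def true_number (name : String) : Int :=
  name.toList.foldl (fun total letter =>
    if PySem.Chars.isalpha letter then
      if PySem.Chars.isIn [PySem.Chars.lowerChar letter] "true".toList then total + 1
      else total
    else total) 0

-- ===== PORT B =====
def true_number_alt (name : String) : Int :=
  let cnt := name.toList.foldl (fun d l =>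
    if PySem.Chars.isalpha l then
      let k := PySem.Chars.lowerChar l
      d.insert k (d.getD k 0 + 1)
    else d) PySem.Dict.empty
  ("true".toList.map (fun c => cnt.getD c 0)).sum

-- ===== PRECONDITION & SPEC =====
def Spec_true_number (name : String) (out : Int) : Prop := out = true_number_alt name
instance (name : String) (out : Int) : Decidable (Spec_true_number name out) := by unfold Spec_true_number; infer_instance

-- ===== CLAIM (what is proved, stated in full; the proofs are below) =====
def Claim_equal_true_number : Prop := ∀ (name : String), Dom_true_number name → Spec_true_number name (true_number name)

-- ===== LEMMAS AND PROOFS =====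

-- the dict state built by B's loop counts each lowered alphabetic character
theorem pv_cnt_getD (xs : List Char) (d : PySem.Dict Char Int) (c : Char) :
    (xs.foldl (fun d l =>
      if PySem.Chars.isalpha l then
        d.insert (PySem.Chars.lowerChar l) (d.getD (PySem.Chars.lowerChar l) 0 + 1)
      else d) d).getD c 0
    = d.getD c 0 +
      (((xs.filter (fun l => PySem.Chars.isalpha l)).map PySem.Chars.lowerChar).count c : Int) := by
  induction xs generalizing d with
  | nil => simp
  | cons x xs ih =>
    simp only [List.foldl_cons]
    by_cases hx : PySem.Chars.isalpha x
    · rw [if_pos hx, ih, PySem.Dict.getD_insert]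
      by_cases hc : c = PySem.Chars.lowerChar x
      · rw [if_pos hc, hc]
        simp [hx]
        ring
      · rw [if_neg hc]
        simp [hx, Ne.symm hc]
    · rw [if_neg hx, ih]
      simp [hx]

-- singleton substring test is membership
theorem pv_isIn_singleton (c : Char) (l : List Char) :
    PySem.Chars.isIn [c] l = l.contains c := by
  rw [Bool.eq_iff_iff, PySem.Chars.isIn_iff_infix, List.singleton_infix_iff,
    List.contains_eq_mem, decide_eq_true_iff]

-- counting elements lying in a duplicate-free target list = summing per-target counts
theorem pv_countP_mem_cons (ys : List Char) (c : Char) (cs : List Char) (h : c ∉ cs) :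
    ys.countP (fun y => decide (y ∈ c :: cs))
      = ys.count c + ys.countP (fun y => decide (y ∈ cs)) := by
  induction ys with
  | nil => simp
  | cons y ys ih =>
    simp only [List.countP_cons, List.count_cons, ih]
    by_cases hy : y = c
    · simp [hy, h]
      omega
    · by_cases hy2 : y ∈ cs <;> simp [hy, hy2] <;> omega

theorem pv_sum_counts (ys : List Char) (cs : List Char) (h : cs.Nodup) :
    (cs.map (fun c => (ys.count c : Int))).sum
      = (ys.countP (fun y => decide (y ∈ cs)) : Int) := by
  induction cs with
  | nil => simp
  | cons c cs ih =>
    simp only [List.nodup_cons] at h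
    rw [List.map_cons, List.sum_cons, ih h.2, pv_countP_mem_cons ys c cs h.1]
    push_cast
    ring

-- ===== VERDICT (by name: the statement is the Claim_ definition above) =====
theorem true_number_spec : Claim_equal_true_number := by
  intro name _
  show true_number name = true_number_alt name
  unfold true_number true_number_alt
  have hfun : (fun (total : Int) letter =>
      if PySem.Chars.isalpha letter then
        if PySem.Chars.isIn [PySem.Chars.lowerChar letter] "true".toList then total + 1
        else total
      else total)
    = (fun (total : Int) letter =>
      if (PySem.Chars.isalpha letter &&
          PySem.Chars.isIn [PySem.Chars.lowerChar letter] "true".toList) then total + 1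
      else total) := by
    funext t l
    by_cases h1 : PySem.Chars.isalpha l <;>
      by_cases h2 : PySem.Chars.isIn [PySem.Chars.lowerChar l] "true".toList <;>
        simp [h1]
  rw [hfun, PySem.List.foldl_if_add_one]
  simp only [pv_cnt_getD name.toList PySem.Dict.empty, PySem.Dict.getD_empty, zero_add]
  rw [pv_sum_counts _ "true".toList (by decide)]
  rw [List.countP_map, List.countP_filter]
  push_cast
  congr 1
  apply List.countP_congr
  intro x _
  simp [Function.comp, pv_isIn_singleton, List.contains_eq_mem, and_comm]
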